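-- pv_equiv track=rewrite | github.com/lastdevourer/kspu-neo4j-project | views/graph.py | _teacher_options
-- ===== SOURCE A (Python) =====
-- def _teacher_options(rows: list[dict[str, object]]) -> dict[str, str]:
--     options: dict[str, str] = {}
--     for row in rows:
--         name = str(row.get("full_name") or "").strip()
--         department_name = str(row.get("department_name") or "").strip()
--         if not name:
--             continue
--         label = f"{name} — {department_name}" if department_name else name
--         suffix = 2
--         candidate = label
--         while candidate in options:
--             candidate = f"{label} ({suffix})"
--             suffix += 1
--         options[candidate] = str(row.get("id") or "").strip()
--     return options
-- ===== SOURCE B (Python) =====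
-- def _teacher_options(rows: list[dict[str, object]]) -> dict[str, str]:
--     items: list[tuple[str, str]] = []
--     used: set[str] = set()
--     next_suffix: dict[str, int] = {}
--     for row in rows:
--         name = str(row.get("full_name") or "").strip()
--         department_name = str(row.get("department_name") or "").strip()
--         if not name:
--             continue
--         label = f"{name} — {department_name}" if department_name else name
--         if label not in used:
--             key = label
--             next_suffix[label] = 2
--         else:
--             s = next_suffix.get(label, 2)
--             while f"{label} ({s})" in used:
--                 s += 1
--             key = f"{label} ({s})"
--             next_suffix[label] = s + 1
--         used.add(key)
--         items.append((key, str(row.get("id") or "").strip()))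
--     return dict(items)
-- ===== Notes on version B (the rewrite author's own statement) =====
-- stated objective: alternative
-- what changed: B replaces A's single dict-with-restarting-probe by different bookkeeping: it appends fresh (key, id) pairs to a plain list, tests collisions against a separate used-key set, and resumes each label's suffix probe at a per-label memoized next suffix instead of restarting it at 2, building the dict once at the end.
import Mathlib
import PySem

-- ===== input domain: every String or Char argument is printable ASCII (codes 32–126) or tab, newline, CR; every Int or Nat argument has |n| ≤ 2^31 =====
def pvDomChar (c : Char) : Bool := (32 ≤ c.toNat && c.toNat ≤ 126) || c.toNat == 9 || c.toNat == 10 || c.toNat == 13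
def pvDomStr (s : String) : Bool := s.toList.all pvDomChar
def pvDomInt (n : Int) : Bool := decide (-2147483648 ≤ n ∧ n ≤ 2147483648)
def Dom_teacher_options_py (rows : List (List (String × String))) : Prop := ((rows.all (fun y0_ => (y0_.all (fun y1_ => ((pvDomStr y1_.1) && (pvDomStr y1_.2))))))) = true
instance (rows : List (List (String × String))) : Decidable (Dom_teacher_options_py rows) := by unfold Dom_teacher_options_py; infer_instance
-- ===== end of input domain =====

-- B builds the result as a plain list of fresh (key, id) pairs plus a separate used-key
-- set, and resumes each label's collision probe at a memoized per-label suffix instead of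
-- restarting it at 2 (objective: alternative single-pass bookkeeping).

-- shared helpers: str(row.get(k) or "").strip()  and the f-string "{label} ({suffix})"
def pvField (row : List (String × String)) (k : String) : String :=
  PySem.Str.strip ((PySem.Dict.mk row).getD k "")

def pvCand (label : String) (suffix : Int) : String :=
  label ++ " (" ++ PySem.Int.toStr suffix ++ ")"

-- ===== PORT A =====
-- the 'while candidate in options' probe, restarting at suffix 2; the Nat argument is
-- fuel that only makes the recursion total (always called with options.items.length + 1,
-- which is enough fuel — proved below)
def pvProbeA (options : PySem.Dict String String) (label : String) (suffix : Int) : Nat → String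
  | 0 => pvCand label suffix
  | f + 1 =>
    let c := pvCand label suffix
    if options.contains c then pvProbeA options label (suffix + 1) f else c

def teacher_options_py (rows : List (List (String × String))) : List (String × String) :=
  (rows.foldl (fun (options : PySem.Dict String String) row =>
      let name := pvField row "full_name"
      let department_name := pvField row "department_name"
      if name = "" then options
      else
        let label := if department_name ≠ "" then name ++ " — " ++ department_name else name
        let candidate :=
          if options.contains label then pvProbeA options label 2 (options.items.length + 1)
          else label
        options.insert candidate (pvField row "id"))
    PySem.Dict.empty).items

-- ===== PORT B =====
-- Source B's 'while f"{label} ({s})" in used: s += 1' over the used-key SET, returning the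
-- final s; the Nat argument is fuel (always called with used.length + 1, enough — proved below)
def pvProbeB (used : PySem.Set String) (label : String) (suffix : Int) : Nat → Int
  | 0 => suffix
  | f + 1 =>
    if PySem.Set.contains used (pvCand label suffix) then pvProbeB used label (suffix + 1) f
    else suffix

-- state = (items list, used key set, next_suffix memo); return dict(items)
def teacher_options_py_alt (rows : List (List (String × String))) : List (String × String) :=
  (PySem.Dict.ofList
    (rows.foldl
      (fun (st : List (String × String) × PySem.Set String × PySem.Dict String Int) row =>
        let name := pvField row "full_name"
        let department_name := pvField row "department_name"
        if name = "" then st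
        else
          let label := if department_name ≠ "" then name ++ " — " ++ department_name else name
          if PySem.Set.contains st.2.1 label then
            let s := pvProbeB st.2.1 label (st.2.2.getD label 2) (st.2.1.length + 1)
            let key := pvCand label s
            (st.1 ++ [(key, pvField row "id")], PySem.Set.add st.2.1 key,
              st.2.2.insert label (s + 1))
          else
            (st.1 ++ [(label, pvField row "id")], PySem.Set.add st.2.1 label,
              st.2.2.insert label 2))
      ([], PySem.Set.empty, PySem.Dict.empty)).1).items

-- ===== PRECONDITION & SPEC =====
def Spec_teacher_options_py (rows : List (List (String × String))) (out : List (String × String)) : Prop := out = teacher_options_py_alt rows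
instance (rows : List (List (String × String))) (out : List (String × String)) : Decidable (Spec_teacher_options_py rows out) := by unfold Spec_teacher_options_py; infer_instance

-- ===== CLAIM (what is proved, stated in full; the proofs are below) =====
def Claim_equal_teacher_options_py : Prop := ∀ (rows : List (List (String × String))), Dom_teacher_options_py rows → Spec_teacher_options_py rows (teacher_options_py rows)

-- ===== LEMMAS AND PROOFS =====

-- decimal digits parse back: injectivity of the printed suffix
def pvParse (a : Nat) (cs : List Char) : Nat :=
  cs.foldl (fun a c => a * 10 + (c.toNat - 48)) a

theorem pv_toDigitsCore_append : ∀ (f n : Nat) (acc : List Char),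
    Nat.toDigitsCore 10 f n acc = Nat.toDigitsCore 10 f n [] ++ acc := by
  intro f
  induction f with
  | zero => intro n acc; simp [Nat.toDigitsCore]
  | succ f ih =>
    intro n acc
    simp only [Nat.toDigitsCore]
    by_cases h : n / 10 = 0
    · simp [h]
    · simp only [h, if_false]
      rw [ih (n / 10) [Nat.digitChar (n % 10)], ih (n / 10) (Nat.digitChar (n % 10) :: acc)]
      simp

theorem pv_digitChar_toNat {n : Nat} (h : n < 10) : (Nat.digitChar n).toNat - 48 = n := by
  interval_cases n <;> decide

theorem pv_parse_core : ∀ (f n a : Nat), n < f →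
    pvParse a (Nat.toDigitsCore 10 f n []) =
      a * 10 ^ (Nat.toDigitsCore 10 f n []).length + n := by
  intro f
  induction f with
  | zero => omega
  | succ f ih =>
    intro n a hn
    by_cases h : n / 10 = 0
    · have hn10 : n < 10 := by omega
      simp [Nat.toDigitsCore, h, pvParse, Nat.mod_eq_of_lt hn10, pv_digitChar_toNat hn10]
    · have hrec : Nat.toDigitsCore 10 (f + 1) n [] =
          Nat.toDigitsCore 10 f (n / 10) [] ++ [Nat.digitChar (n % 10)] := by
        conv_lhs => simp only [Nat.toDigitsCore]
        simp only [h, if_false]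
        exact pv_toDigitsCore_append f (n / 10) [Nat.digitChar (n % 10)]
      have hlt : n / 10 < f := by
        have h1 : n / 10 < n := Nat.div_lt_self (by omega) (by omega)
        omega
      rw [hrec]
      simp only [pvParse, List.foldl_append, List.length_append, List.length_cons,
        List.length_nil, List.foldl_cons, List.foldl_nil]
      have := ih (n / 10) a hlt
      simp only [pvParse] at this
      rw [this, pv_digitChar_toNat (Nat.mod_lt n (by omega))]
      have : a * 10 ^ ((Nat.toDigitsCore 10 f (n / 10) []).length + (0 + 1)) =
          a * 10 ^ (Nat.toDigitsCore 10 f (n / 10) []).length * 10 := by ring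
      rw [this]
      omega

theorem pv_toDigits_parse (n : Nat) : pvParse 0 (Nat.toDigits 10 n) = n := by
  have := pv_parse_core (n + 1) n 0 (Nat.lt_succ_self n)
  simpa [Nat.toDigits] using this

theorem pv_toChars_inj {m n : Int} (hm : 0 ≤ m) (hn : 0 ≤ n)
    (h : PySem.Int.toChars m = PySem.Int.toChars n) : m = n := by
  unfold PySem.Int.toChars at h
  rw [if_neg (by omega), if_neg (by omega)] at h
  have := congrArg (pvParse 0) h
  rw [pv_toDigits_parse, pv_toDigits_parse] at this
  omega

theorem pvCand_inj {l : String} {j k : Int} (hj : 0 ≤ j) (hk : 0 ≤ k)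
    (h : pvCand l j = pvCand l k) : j = k := by
  unfold pvCand at h
  rw [← String.toList_inj] at h
  simp only [String.toList_append, List.append_assoc] at h
  have h1 := List.append_cancel_left h
  have h2 := List.append_cancel_left h1
  have h3 : PySem.Int.toChars j = PySem.Int.toChars k := by
    apply List.append_cancel_right (bs := (")" : String).toList)
    simpa [PySem.Int.toList_toStr] using h2
  exact pv_toChars_inj hj hk h3

-- pigeonhole facts about the probe candidates
theorem pv_cands_nodup (l : String) (s0 : Int) (hs : 0 ≤ s0) (n : Nat) :
    ((List.range n).map (fun i : Nat => pvCand l (s0 + (i : Int)))).Nodup := by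
  refine List.Nodup.map_on ?_ List.nodup_range
  intro x _ y _ hxy
  have := pvCand_inj (l := l) (by omega) (by omega) hxy
  omega

theorem pv_exists_free (d : PySem.Dict String String) (hnd : d.keys.Nodup) (l : String) :
    ∃ k : Int, 2 ≤ k ∧ k ≤ 2 + (d.items.length : Int) ∧
      d.contains (pvCand l k) = false := by
  by_contra hc
  push_neg at hc
  have hsub : ((List.range (d.items.length + 1)).map (fun i : Nat => pvCand l (2 + (i : Int)))) ⊆ d.keys := by
    intro x hx
    simp only [List.mem_map, List.mem_range] at hx
    obtain ⟨i, hi, rfl⟩ := hx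
    have hcont : d.contains (pvCand l (2 + (i : Int))) = true := by
      have h1 := hc (2 + (i : Int)) (by omega) (by push_cast; omega)
      cases hb : d.contains (pvCand l (2 + (i : Int))) with
      | false => exact absurd hb h1
      | true => rfl
    exact (PySem.Dict.contains_iff_mem_keys d _).mp hcont
  have hlen := ((pv_cands_nodup l 2 (by omega) (d.items.length + 1)).subperm hsub).length_le
  have hkeys : d.keys.length = d.items.length := by
    simp [PySem.Dict.keys]
  simp only [List.length_map, List.length_range, hkeys] at hlen
  omega

theorem pv_bound_from_contained (d : PySem.Dict String String) (hnd : d.keys.Nodup)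
    (l : String) {s : Int} (h2 : 2 ≤ s)
    (hall : ∀ j : Int, 2 ≤ j → j < s → d.contains (pvCand l j) = true) :
    s - 2 ≤ (d.items.length : Int) := by
  have hsub : ((List.range (s - 2).toNat).map (fun i : Nat => pvCand l (2 + (i : Int)))) ⊆ d.keys := by
    intro x hx
    simp only [List.mem_map, List.mem_range] at hx
    obtain ⟨i, hi, rfl⟩ := hx
    exact (PySem.Dict.contains_iff_mem_keys d _).mp (hall (2 + (i : Int)) (by omega) (by omega))
  have hlen := ((pv_cands_nodup l 2 (by omega) (s - 2).toNat).subperm hsub).length_le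
  have hkeys : d.keys.length = d.items.length := by simp [PySem.Dict.keys]
  simp only [List.length_map, List.length_range, hkeys] at hlen
  omega

-- characterization of A's restart-at-2 probe under sufficient fuel
theorem pv_probeA_char (d : PySem.Dict String String) (l : String) :
    ∀ (fuel : Nat) (s : Int),
      (∃ k : Int, s ≤ k ∧ k - s < (fuel : Int) ∧ d.contains (pvCand l k) = false) →
      ∃ K : Int, s ≤ K ∧ d.contains (pvCand l K) = false ∧
        (∀ j : Int, s ≤ j → j < K → d.contains (pvCand l j) = true) ∧
        pvProbeA d l s fuel = pvCand l K := by
  intro fuel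
  induction fuel with
  | zero => intro s ⟨k, hk1, hk2, _⟩; simp at hk2; omega
  | succ f ih =>
    intro s ⟨k, hk1, hk2, hk3⟩
    by_cases hc : d.contains (pvCand l s) = true
    · have hks : s + 1 ≤ k := by
        rcases eq_or_lt_of_le hk1 with h | h
        · rw [← h] at hk3; rw [hc] at hk3; cases hk3
        · omega
      obtain ⟨K, hK1, hK2, hK3, hK4⟩ := ih (s + 1) ⟨k, hks, by push_cast; omega, hk3⟩
      refine ⟨K, by omega, hK2, ?_, ?_⟩
      · intro j hj1 hj2
        rcases eq_or_lt_of_le hj1 with h | h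
        · rw [← h]; exact hc
        · exact hK3 j (by omega) hj2
      · simp only [pvProbeA, hc, if_true]; exact hK4
    · rw [Bool.not_eq_true] at hc
      refine ⟨s, le_refl s, hc, by omega, ?_⟩
      simp [pvProbeA, hc]

-- characterization of B's resumed probe over the used-key set under sufficient fuel
theorem pv_probeB_char (u : PySem.Set String) (l : String) :
    ∀ (fuel : Nat) (s : Int),
      (∃ k : Int, s ≤ k ∧ k - s < (fuel : Int) ∧ PySem.Set.contains u (pvCand l k) = false) →
      ∃ K : Int, s ≤ K ∧ PySem.Set.contains u (pvCand l K) = false ∧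
        (∀ j : Int, s ≤ j → j < K → PySem.Set.contains u (pvCand l j) = true) ∧
        pvProbeB u l s fuel = K := by
  intro fuel
  induction fuel with
  | zero => intro s ⟨k, hk1, hk2, _⟩; simp at hk2; omega
  | succ f ih =>
    intro s ⟨k, hk1, hk2, hk3⟩
    by_cases hc : PySem.Set.contains u (pvCand l s) = true
    · have hks : s + 1 ≤ k := by
        rcases eq_or_lt_of_le hk1 with h | h
        · rw [← h] at hk3; rw [hc] at hk3; cases hk3
        · omega
      obtain ⟨K, hK1, hK2, hK3, hK4⟩ := ih (s + 1) ⟨k, hks, by push_cast; omega, hk3⟩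
      refine ⟨K, by omega, hK2, ?_, ?_⟩
      · intro j hj1 hj2
        rcases eq_or_lt_of_le hj1 with h | h
        · rw [← h]; exact hc
        · exact hK3 j (by omega) hj2
      · simp only [pvProbeB, hc, if_true]; exact hK4
    · rw [Bool.not_eq_true] at hc
      refine ⟨s, le_refl s, hc, by omega, ?_⟩
      simp only [pvProbeB, hc, Bool.false_eq_true, if_false]

-- the used set of B tracks exactly the key set of A's dict
theorem pv_contains_eq (u : PySem.Set String) (d : PySem.Dict String String)
    (hm : ∀ c, c ∈ u ↔ c ∈ d.keys) (c : String) :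
    PySem.Set.contains u c = d.contains c := by
  rw [PySem.Dict.contains_eq_decide_mem_keys]
  by_cases h : c ∈ d.keys
  · have h1 : c ∈ u := (hm c).mpr h
    simp [PySem.Set.contains, h, h1]
  · have h2 : c ∉ u := fun hc => h ((hm c).mp hc)
    simp [PySem.Set.contains, h, h2]

theorem pv_mem_step (u : PySem.Set String) (d : PySem.Dict String String)
    (hm : ∀ c, c ∈ u ↔ c ∈ d.keys) (k v : String) (c : String) :
    c ∈ PySem.Set.add u k ↔ c ∈ (d.insert k v).keys := by
  rw [PySem.Set.mem_add, PySem.Dict.mem_keys_insert, hm c]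
  tauto

theorem pv_len_eq (u : PySem.Set String) (d : PySem.Dict String String)
    (hu : u.Nodup) (hnd : d.keys.Nodup) (hm : ∀ c, c ∈ u ↔ c ∈ d.keys) :
    u.length = d.items.length := by
  have h1 := (hu.subperm (fun c hc => (hm c).mp hc)).length_le
  have h2 := (hnd.subperm (fun c hc => (hm c).mpr hc)).length_le
  have hkeys : d.keys.length = d.items.length := by simp [PySem.Dict.keys]
  omega

-- the loop invariant relating B's memo dict to the taken keys
def pvInv (d : PySem.Dict String String) (ns : PySem.Dict String Int) : Prop :=
  ∀ l s, ns.get? l = some s →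
    2 ≤ s ∧ ∀ j : Int, 2 ≤ j → j < s → d.contains (pvCand l j) = true

-- the collision step: A's restart probe and B's resumed probe land on the same suffix K
theorem pv_step_eq (d : PySem.Dict String String) (u : PySem.Set String)
    (ns : PySem.Dict String Int) (l : String)
    (hnd : d.keys.Nodup) (hu : u.Nodup) (hm : ∀ c, c ∈ u ↔ c ∈ d.keys)
    (hInv : pvInv d ns) :
    ∃ K : Int, 2 ≤ K ∧
      pvProbeA d l 2 (d.items.length + 1) = pvCand l K ∧
      pvProbeB u l (ns.getD l 2) (u.length + 1) = K ∧
      d.contains (pvCand l K) = false ∧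
      (∀ j : Int, 2 ≤ j → j < K → d.contains (pvCand l j) = true) := by
  obtain ⟨k, hk2, hkle, hkfree⟩ := pv_exists_free d hnd l
  -- A's probe from 2
  obtain ⟨K, hK1, hK2, hK3, hK4⟩ := pv_probeA_char d l (d.items.length + 1) 2
    ⟨k, hk2, by push_cast; omega, hkfree⟩
  -- the memoized start s0 and its prefix of taken suffixes
  set s0 := ns.getD l 2 with hs0
  have hstart : 2 ≤ s0 ∧ ∀ j : Int, 2 ≤ j → j < s0 → d.contains (pvCand l j) = true := by
    rw [hs0, PySem.Dict.getD_eq_get?_getD]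
    cases hg : ns.get? l with
    | none => exact ⟨by norm_num, by intro j h1 h2; simp at h2; omega⟩
    | some s => simpa using hInv l s hg
  obtain ⟨hs2, hall0⟩ := hstart
  have hlen : u.length = d.items.length := pv_len_eq u d hu hnd hm
  have hKs0 : s0 ≤ K := by
    by_contra hlt
    push_neg at hlt
    rw [hall0 K hK1 hlt] at hK2; cases hK2
  have hKbound : K - 2 ≤ (d.items.length : Int) :=
    pv_bound_from_contained d hnd l hK1 hK3
  -- B's probe from s0, fuel u.length + 1
  obtain ⟨K', hK'1, hK'2, hK'3, hK'4⟩ := pv_probeB_char u l (u.length + 1) s0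
    ⟨K, hKs0, by rw [hlen]; push_cast; omega,
      by rw [pv_contains_eq u d hm]; exact hK2⟩
  have hK'free : d.contains (pvCand l K') = false := by
    rw [← pv_contains_eq u d hm]; exact hK'2
  have hK'all : ∀ j : Int, 2 ≤ j → j < K' → d.contains (pvCand l j) = true := by
    intro j hj1 hj2
    by_cases hjs : j < s0
    · exact hall0 j hj1 hjs
    · rw [← pv_contains_eq u d hm]; exact hK'3 j (by omega) hj2
  have hKK : K = K' := by
    rcases lt_trichotomy K K' with h | h | h
    · rw [hK'all K hK1 h] at hK2; cases hK2
    · exact h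
    · exact absurd (hK3 K' (by omega) h) (by simp [hK'free])
  subst hKK
  exact ⟨K, hK1, hK4, hK'4, hK2, hK3⟩

theorem pv_contains_mono (d : PySem.Dict String String) (k : String) (v : String)
    (c : String) (h : d.contains c = true) : (d.insert k v).contains c = true := by
  rw [PySem.Dict.contains_insert]
  simp [h]

-- the main fold correspondence: A's dict equals dict(B's items list) throughout the loop
theorem pv_fold_eq : ∀ (rows : List (List (String × String)))
    (items : List (String × String)) (u : PySem.Set String) (ns : PySem.Dict String Int)
    (d : PySem.Dict String String),
    PySem.Dict.ofList items = d →
    d.keys.Nodup → u.Nodup → (∀ c, c ∈ u ↔ c ∈ d.keys) → pvInv d ns →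
    rows.foldl (fun (options : PySem.Dict String String) row =>
      let name := pvField row "full_name"
      let department_name := pvField row "department_name"
      if name = "" then options
      else
        let label := if department_name ≠ "" then name ++ " — " ++ department_name else name
        let candidate :=
          if options.contains label then pvProbeA options label 2 (options.items.length + 1)
          else label
        options.insert candidate (pvField row "id")) d =
    PySem.Dict.ofList
      ((rows.foldl
        (fun (st : List (String × String) × PySem.Set String × PySem.Dict String Int) row =>
          let name := pvField row "full_name"
          let department_name := pvField row "department_name"
          if name = "" then st
          else
            let label := if department_name ≠ "" then name ++ " — " ++ department_name else name
            if PySem.Set.contains st.2.1 label then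
              let s := pvProbeB st.2.1 label (st.2.2.getD label 2) (st.2.1.length + 1)
              let key := pvCand label s
              (st.1 ++ [(key, pvField row "id")], PySem.Set.add st.2.1 key,
                st.2.2.insert label (s + 1))
            else
              (st.1 ++ [(label, pvField row "id")], PySem.Set.add st.2.1 label,
                st.2.2.insert label 2))
        (items, u, ns)).1) := by
  intro rows
  induction rows with
  | nil =>
    intro items u ns d hd _ _ _ _
    simpa using hd.symm
  | cons row rest ih =>
    intro items u ns d hd hnd hu hm hInv
    simp only [List.foldl_cons]
    by_cases hname : pvField row "full_name" = ""
    · simp only [hname, if_pos rfl]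
      exact ih items u ns d hd hnd hu hm hInv
    · simp only [if_neg hname]
      set label := if pvField row "department_name" ≠ "" then
        pvField row "full_name" ++ " — " ++ pvField row "department_name"
        else pvField row "full_name" with hlabel
      have hofA : ∀ (k v : String),
          PySem.Dict.ofList (items ++ [(k, v)]) = d.insert k v := by
        intro k v
        rw [← hd]
        simp [PySem.Dict.ofList, PySem.Dict.update]
      have hcb : PySem.Set.contains u label = d.contains label := pv_contains_eq u d hm label
      by_cases hc : d.contains label = true
      · obtain ⟨K, hK2, hA, hB, hfree, hall⟩ := pv_step_eq d u ns label hnd hu hm hInv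
        simp only [hc, if_true, hcb, hA, hB]
        apply ih
        · exact hofA _ _
        · exact PySem.Dict.nodup_keys_insert d _ _ hnd
        · exact PySem.Set.nodup_add u _ hu
        · exact pv_mem_step u d hm _ _
        · intro l' s' hg
          by_cases hl : l' = label
          · subst hl
            rw [PySem.Dict.get?_insert] at hg
            simp at hg
            refine ⟨by omega, ?_⟩
            intro j hj1 hj2
            by_cases hjK : j = K
            · subst hjK
              rw [PySem.Dict.contains_insert]
              simp
            · exact pv_contains_mono d _ _ _ (hall j hj1 (by omega))
          · rw [PySem.Dict.get?_insert] at hg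
            rw [if_neg hl] at hg
            obtain ⟨h1, h2⟩ := hInv l' s' hg
            exact ⟨h1, fun j hj1 hj2 => pv_contains_mono d _ _ _ (h2 j hj1 hj2)⟩
      · simp only [Bool.not_eq_true] at hc
        simp only [hc, Bool.false_eq_true, if_false, hcb]
        apply ih
        · exact hofA _ _
        · exact PySem.Dict.nodup_keys_insert d _ _ hnd
        · exact PySem.Set.nodup_add u _ hu
        · exact pv_mem_step u d hm _ _
        · intro l' s' hg
          by_cases hl : l' = label
          · subst hl
            rw [PySem.Dict.get?_insert] at hg
            simp at hg
            exact ⟨by omega, by intro j hj1 hj2; omega⟩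
          · rw [PySem.Dict.get?_insert] at hg
            rw [if_neg hl] at hg
            obtain ⟨h1, h2⟩ := hInv l' s' hg
            exact ⟨h1, fun j hj1 hj2 => pv_contains_mono d _ _ _ (h2 j hj1 hj2)⟩

-- ===== VERDICT (by name: the statement is the Claim_ definition above) =====
theorem teacher_options_py_spec : Claim_equal_teacher_options_py := by
  intro rows _
  unfold Spec_teacher_options_py teacher_options_py teacher_options_py_alt
  congr 1
  apply pv_fold_eq rows [] PySem.Set.empty PySem.Dict.empty PySem.Dict.empty rfl
  · simp [PySem.Dict.keys]
    constructor
  · constructor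
  · intro c
    simp [PySem.Set.empty, PySem.Dict.keys, PySem.Dict.empty]
  · intro l s hg
    simp [PySem.Dict.get?, PySem.Dict.empty] at hg
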